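-- pv_equiv track=rewrite | github.com/taurinrobinson-wq/saoriverse-console | emotional_os/glyphs/emotional_tag_matcher.py | select_optimal_persona
-- ===== SOURCE A (Python) =====
-- from typing import List, Dict, Optional
--
-- def select_optimal_persona(emotional_tags: List[str], conversation_context: Dict = None) -> str:
--     """Select the best persona (Oracle, Guardian, Companion, etc.) based on emotional state"""
--
--     conversation_depth = len(conversation_context.get('messages', [])) if conversation_context else 0
--
--     # Analyze emotional tags to select persona
--     if any('grief' in tag.lower() or 'mourning' in tag.lower() for tag in emotional_tags):
--         if conversation_depth <= 2:
--             return 'oracle'  # Deep wisdom for initial grief processing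
--         else:
--             return 'companion'  # Gentle support for ongoing grief work
--
--     elif any('ache' in tag.lower() or 'longing' in tag.lower() for tag in emotional_tags):
--         return 'oracle'  # Poetic wisdom for longing states
--
--     elif any('joy' in tag.lower() or 'delight' in tag.lower() for tag in emotional_tags):
--         return 'friend'  # Celebratory companion for joy
--
--     elif any('confusion' in tag.lower() for tag in emotional_tags):
--         return 'mentor'  # Clarifying guidance for confusion
--
--     else:
--         return 'companion'  # Default gentle presence
-- ===== SOURCE B (Python) =====
-- KEYWORD_TIERS = (('grief', 'mourning'), ('ache', 'longing'), ('joy', 'delight'), ('confusion',))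
-- PERSONA_BY_RANK = ('oracle', 'friend', 'mentor', 'companion')  # personas for ranks 1..4
--
--
-- def _rank(tag):
--     """Score one tag: index of the highest-priority keyword tier it matches, 4 if none."""
--     t = tag.lower()
--     return next((i for i, kws in enumerate(KEYWORD_TIERS) if any(k in t for k in kws)), 4)
--
--
-- def select_optimal_persona(emotional_tags, conversation_context=None):
--     # Score every tag independently, take the minimum (best-priority) score,
--     # then decode the score into a persona via a table lookup.
--     best = min(map(_rank, emotional_tags), default=4)
--     if best == 0:  # grief tier: depends on conversation depth
--         depth = len(conversation_context.get('messages', [])) if conversation_context else 0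
--         return 'oracle' if depth <= 2 else 'companion'
--     return PERSONA_BY_RANK[best - 1]
-- ===== Notes on version B (the rewrite author's own statement) =====
-- stated objective: alternative
-- what changed: Replaces A's four tiered short-circuit any()-scans and if/elif chain with a scoring scheme: each tag is mapped once to a numeric priority rank, the minimum rank is taken over all tags, and the persona is decoded from that rank by table lookup.
import Mathlib
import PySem

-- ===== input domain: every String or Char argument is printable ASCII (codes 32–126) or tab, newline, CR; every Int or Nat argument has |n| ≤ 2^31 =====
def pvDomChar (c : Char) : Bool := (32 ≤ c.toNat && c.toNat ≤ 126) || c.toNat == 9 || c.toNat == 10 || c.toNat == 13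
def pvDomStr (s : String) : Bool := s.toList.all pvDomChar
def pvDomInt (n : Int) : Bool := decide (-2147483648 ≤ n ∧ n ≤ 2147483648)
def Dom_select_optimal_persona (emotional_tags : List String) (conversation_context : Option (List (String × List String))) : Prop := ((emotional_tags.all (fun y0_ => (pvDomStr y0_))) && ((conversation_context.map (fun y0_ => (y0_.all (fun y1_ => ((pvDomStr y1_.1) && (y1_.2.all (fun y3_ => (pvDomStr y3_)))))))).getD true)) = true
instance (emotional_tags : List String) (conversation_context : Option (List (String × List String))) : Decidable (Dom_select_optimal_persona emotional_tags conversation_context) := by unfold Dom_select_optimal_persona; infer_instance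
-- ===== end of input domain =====

-- B replaces A's tiered any()-scans + if/elif chain by a scoring scheme: each tag is mapped
-- to a numeric priority rank, the minimum rank over all tags is taken, and the persona is
-- decoded from that rank by table lookup (objective: alternative).

-- ===== PORT A =====
def select_optimal_persona (emotional_tags : List String) (conversation_context : Option (List (String × List String))) : String :=
  let conversation_depth : Int :=
    match conversation_context with
    | none => 0
    | some d => if d.isEmpty then 0 else ((PySem.Dict.mk d).getD "messages" []).length
  if emotional_tags.any (fun tag => PySem.Str.isIn "grief" (PySem.Str.lower tag) || PySem.Str.isIn "mourning" (PySem.Str.lower tag)) then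
    if conversation_depth ≤ 2 then "oracle" else "companion"
  else if emotional_tags.any (fun tag => PySem.Str.isIn "ache" (PySem.Str.lower tag) || PySem.Str.isIn "longing" (PySem.Str.lower tag)) then
    "oracle"
  else if emotional_tags.any (fun tag => PySem.Str.isIn "joy" (PySem.Str.lower tag) || PySem.Str.isIn "delight" (PySem.Str.lower tag)) then
    "friend"
  else if emotional_tags.any (fun tag => PySem.Str.isIn "confusion" (PySem.Str.lower tag)) then
    "mentor"
  else
    "companion"

-- ===== PORT B =====
-- Source B's _rank: index of the first keyword tier matching the (once-lowercased) tag, 4 if none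
def pvRank (tag : String) : Nat :=
  let t := PySem.Str.lower tag
  if PySem.Str.isIn "grief" t || PySem.Str.isIn "mourning" t then 0
  else if PySem.Str.isIn "ache" t || PySem.Str.isIn "longing" t then 1
  else if PySem.Str.isIn "joy" t || PySem.Str.isIn "delight" t then 2
  else if PySem.Str.isIn "confusion" t then 3
  else 4

def select_optimal_persona_alt (emotional_tags : List String) (conversation_context : Option (List (String × List String))) : String :=
  -- min(map(_rank, tags), default=4)
  let best : Nat := (emotional_tags.map pvRank).foldl min 4
  if best = 0 then
    let depth : Int :=
      match conversation_context with
      | none => 0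
      | some d => if d.isEmpty then 0 else ((PySem.Dict.mk d).getD "messages" []).length
    if depth ≤ 2 then "oracle" else "companion"
  else
    -- PERSONA_BY_RANK[best-1]; the index is provably in range here (1 ≤ best ≤ 4), so the
    -- .getD default is unreachable and Python never raises
    (PySem.List.pyGet? ["oracle", "friend", "mentor", "companion"] ((best : Int) - 1)).getD ""

-- ===== PRECONDITION & SPEC =====
def Spec_select_optimal_persona (emotional_tags : List String) (conversation_context : Option (List (String × List String))) (out : String) : Prop := out = select_optimal_persona_alt emotional_tags conversation_context
instance (emotional_tags : List String) (conversation_context : Option (List (String × List String))) (out : String) : Decidable (Spec_select_optimal_persona emotional_tags conversation_context out) := by unfold Spec_select_optimal_persona; infer_instance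

-- ===== CLAIM (what is proved, stated in full; the proofs are below) =====
def Claim_equal_select_optimal_persona : Prop := ∀ (emotional_tags : List String) (conversation_context : Option (List (String × List String))), Dom_select_optimal_persona emotional_tags conversation_context → Spec_select_optimal_persona emotional_tags conversation_context (select_optimal_persona emotional_tags conversation_context)

-- ===== LEMMAS AND PROOFS =====
-- the minimum rank, written as A's tiered nested-if over the four any-scans
def pvTier (tags : List String) : Nat :=
  if tags.any (fun tag => PySem.Str.isIn "grief" (PySem.Str.lower tag) || PySem.Str.isIn "mourning" (PySem.Str.lower tag)) then 0
  else if tags.any (fun tag => PySem.Str.isIn "ache" (PySem.Str.lower tag) || PySem.Str.isIn "longing" (PySem.Str.lower tag)) then 1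
  else if tags.any (fun tag => PySem.Str.isIn "joy" (PySem.Str.lower tag) || PySem.Str.isIn "delight" (PySem.Str.lower tag)) then 2
  else if tags.any (fun tag => PySem.Str.isIn "confusion" (PySem.Str.lower tag)) then 3
  else 4

theorem pvTier_le (tags : List String) : pvTier tags ≤ 4 := by
  unfold pvTier; split_ifs <;> omega

theorem pvTier_cons (hd : String) (tl : List String) :
    pvTier (hd :: tl) = min (pvRank hd) (pvTier tl) := by
  unfold pvTier pvRank
  rcases Bool.eq_false_or_eq_true (PySem.Str.isIn "grief" (PySem.Str.lower hd) || PySem.Str.isIn "mourning" (PySem.Str.lower hd)) with h1 | h1 <;>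
  rcases Bool.eq_false_or_eq_true (PySem.Str.isIn "ache" (PySem.Str.lower hd) || PySem.Str.isIn "longing" (PySem.Str.lower hd)) with h2 | h2 <;>
  rcases Bool.eq_false_or_eq_true (PySem.Str.isIn "joy" (PySem.Str.lower hd) || PySem.Str.isIn "delight" (PySem.Str.lower hd)) with h3 | h3 <;>
  rcases Bool.eq_false_or_eq_true (PySem.Str.isIn "confusion" (PySem.Str.lower hd)) with h4 | h4 <;>
    simp only [List.any_cons, h1, h2, h3, h4, Bool.false_or, Bool.true_or, if_true, if_false,
      Bool.false_eq_true] <;>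
    split_ifs <;> omega

theorem pvFold_min (tags : List String) :
    ∀ a : Nat, a ≤ 4 → (tags.map pvRank).foldl min a = min a (pvTier tags) := by
  induction tags with
  | nil =>
    intro a ha
    unfold pvTier; simp; omega
  | cons hd tl ih =>
    intro a ha
    simp only [List.map_cons, List.foldl_cons]
    rw [ih (min a (pvRank hd)) (by omega), pvTier_cons]
    omega

theorem pvBest_eq (tags : List String) : (tags.map pvRank).foldl min 4 = pvTier tags := by
  rw [pvFold_min tags 4 (le_refl 4)]
  have := pvTier_le tags
  omega

-- ===== VERDICT (by name: the statement is the Claim_ definition above) =====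
theorem select_optimal_persona_spec : Claim_equal_select_optimal_persona := by
  intro tags ctx _
  unfold Spec_select_optimal_persona select_optimal_persona select_optimal_persona_alt
  rw [pvBest_eq]
  unfold pvTier
  rcases Bool.eq_false_or_eq_true (tags.any (fun tag => PySem.Str.isIn "grief" (PySem.Str.lower tag) || PySem.Str.isIn "mourning" (PySem.Str.lower tag))) with h1 | h1 <;>
  rcases Bool.eq_false_or_eq_true (tags.any (fun tag => PySem.Str.isIn "ache" (PySem.Str.lower tag) || PySem.Str.isIn "longing" (PySem.Str.lower tag))) with h2 | h2 <;>
  rcases Bool.eq_false_or_eq_true (tags.any (fun tag => PySem.Str.isIn "joy" (PySem.Str.lower tag) || PySem.Str.isIn "delight" (PySem.Str.lower tag))) with h3 | h3 <;>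
  rcases Bool.eq_false_or_eq_true (tags.any (fun tag => PySem.Str.isIn "confusion" (PySem.Str.lower tag))) with h4 | h4 <;>
    simp only [h1, h2, h3, h4, if_true, if_false, Bool.false_eq_true] <;>
    norm_num [PySem.List.pyGet?, PySem.List.pyIdx?] <;> rfl
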